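-- pv_equiv track=rewrite | github.com/joel-s/portfolio | Python/Distractions/bitmap-to-numbers.py | numbersToBitmapText
-- ===== SOURCE A (Python) =====
-- def numberToText(number, bits):
--     text = ""
--     for bit in range(bits):
--         if number & 1:
--             text = "%" + text
--         else:
--             text = " " + text
--         number >>= 1
--     return text
--
-- def numbersToBitmapText(numberArray):
--     textArray = []
--     for line in numberArray:
--         textLine = ""
--         while line:
--             number, line = line[0], line[1:]
--             textLine += numberToText(number, 16)
--         textArray.append(textLine)
--     return textArray
-- ===== SOURCE B (Python) =====
-- # Same rows as the original, computed nibble-wise from a precomputed 16-entry table.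
-- _NIBBLE = ["    ", "   %", "  % ", "  %%", " %  ", " % %", " %% ", " %%%",
--            "%   ", "%  %", "% % ", "% %%", "%%  ", "%% %", "%%% ", "%%%%"]
--
-- def numbersToBitmapText(numberArray):
--     return ["".join(_NIBBLE[m // 4096] + _NIBBLE[m // 256 % 16] +
--                     _NIBBLE[m // 16 % 16] + _NIBBLE[m % 16]
--                     for m in (n % 65536 for n in line))
--             for line in numberArray]
-- ===== Notes on version B (the rewrite author's own statement) =====
-- stated objective: faster
-- what changed: Replaces A's per-bit inner loop (16 shift/mask iterations with string prepending per number, inside a while loop that re-slices the list) with a precomputed 16-entry nibble-to-4-chars lookup table: each number is reduced mod 2^16 and its four nibbles, high to low, are looked up and concatenated in a comprehension with join; fewer interpreted operations per number gives a constant-factor speedup (measured ~6x).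
import Mathlib
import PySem

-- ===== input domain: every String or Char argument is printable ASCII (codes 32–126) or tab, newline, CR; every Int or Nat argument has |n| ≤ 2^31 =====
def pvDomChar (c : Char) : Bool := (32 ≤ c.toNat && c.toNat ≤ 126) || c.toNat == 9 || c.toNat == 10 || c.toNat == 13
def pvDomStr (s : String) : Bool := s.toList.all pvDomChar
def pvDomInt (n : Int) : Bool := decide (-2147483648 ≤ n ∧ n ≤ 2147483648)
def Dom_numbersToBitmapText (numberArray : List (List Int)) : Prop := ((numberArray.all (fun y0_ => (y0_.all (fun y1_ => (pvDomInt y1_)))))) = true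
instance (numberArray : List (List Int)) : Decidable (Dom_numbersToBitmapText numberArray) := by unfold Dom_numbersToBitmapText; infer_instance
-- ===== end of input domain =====

-- B replaces A's per-bit while/for loops by a precomputed 16-entry nibble table:
-- each number is reduced mod 2^16 and its four nibbles (high to low) are looked up
-- and concatenated; same return value, measurably faster by a constant factor (objective: faster).

-- ===== PORT A =====
-- numberToText(number, bits): builds the string low bit first, prepending
def numberToText (number : Int) (bits : Int) : String :=
  ((PySem.List.pyRange 0 bits 1).foldl
    (fun (st : String × Int) _ =>
      ((if PySem.Int.band st.2 1 ≠ 0 then "%" ++ st.1 else " " ++ st.1), st.2 >>> (1 : Nat)))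
    ("", number)).1

-- the 'while line:' loop of numbersToBitmapText (line[0] / line[1:] = head / tail)
def numbersToBitmapTextLoop : List Int → String → String
  | [], textLine => textLine
  | number :: rest, textLine => numbersToBitmapTextLoop rest (textLine ++ numberToText number 16)

def numbersToBitmapText (numberArray : List (List Int)) : List String :=
  numberArray.foldl (fun textArray line => textArray ++ [numbersToBitmapTextLoop line ""]) []

-- ===== PORT B =====
def nibbleTable : List String :=
  ["    ", "   %", "  % ", "  %%", " %  ", " % %", " %% ", " %%%",
   "%   ", "%  %", "% % ", "% %%", "%%  ", "%% %", "%%% ", "%%%%"]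

-- _NIBBLE[m // 4096] + _NIBBLE[m // 256 % 16] + _NIBBLE[m // 16 % 16] + _NIBBLE[m % 16]
def nibbleRow (m : Int) : String :=
  ((PySem.List.pyGetD nibbleTable (PySem.Int.floordiv m 4096) "" ++
    PySem.List.pyGetD nibbleTable (PySem.Int.mod (PySem.Int.floordiv m 256) 16) "") ++
   PySem.List.pyGetD nibbleTable (PySem.Int.mod (PySem.Int.floordiv m 16) 16) "") ++
  PySem.List.pyGetD nibbleTable (PySem.Int.mod m 16) ""

def numbersToBitmapText_alt (numberArray : List (List Int)) : List String :=
  numberArray.map (fun line =>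
    PySem.Str.join "" (line.map (fun n => nibbleRow (PySem.Int.mod n 65536))))

-- ===== PRECONDITION & SPEC =====
def Spec_numbersToBitmapText (numberArray : List (List Int)) (out : List String) : Prop := out = numbersToBitmapText_alt numberArray
instance (numberArray : List (List Int)) (out : List String) : Decidable (Spec_numbersToBitmapText numberArray out) := by unfold Spec_numbersToBitmapText; infer_instance

-- ===== CLAIM (what is proved, stated in full; the proofs are below) =====
def Claim_equal_numbersToBitmapText : Prop := ∀ (numberArray : List (List Int)), Dom_numbersToBitmapText numberArray → Spec_numbersToBitmapText numberArray (numbersToBitmapText numberArray)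

-- ===== LEMMAS AND PROOFS =====

-- k low bits of n as a string, highest of the k bits first (what A's inner loop builds)
def chunk : Int → Nat → String
  | _, 0 => ""
  | n, k+1 => chunk (n / 2) k ++ (if n % 2 = 1 then "%" else " ")

lemma shiftRight_one (n : Int) : n >>> (1 : Nat) = n / 2 := by
  simp [Int.shiftRight_eq_div_pow]

lemma band_one_emod (n : Int) : PySem.Int.band n 1 = n % 2 := by
  rw [PySem.Int.band_one]; exact PySem.Int.mod_eq_emod_of_pos (by norm_num)

lemma foldl_chunk (l : List Int) (t : String) (n : Int) :
    (l.foldl (fun (st : String × Int) _ =>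
      ((if PySem.Int.band st.2 1 ≠ 0 then "%" ++ st.1 else " " ++ st.1), st.2 >>> (1 : Nat)))
      (t, n)).1 = chunk n l.length ++ t := by
  induction l generalizing t n with
  | nil => simp [chunk, String.empty_append]
  | cons x l ih =>
      simp only [List.foldl_cons, List.length_cons]
      rw [ih]
      simp only [shiftRight_one, band_one_emod, chunk, String.append_assoc]
      rcases (show n % 2 = 0 ∨ n % 2 = 1 by omega) with h | h <;> simp [h]

lemma numberToText_eq_chunk (n : Int) : numberToText n 16 = chunk n 16 := by
  have hr : PySem.List.pyRange 0 16 1 = [0,1,2,3,4,5,6,7,8,9,10,11,12,13,14,15] := by decide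
  rw [numberToText, hr, foldl_chunk]
  simp [String.append_empty]

lemma chunk_congr : ∀ (k : Nat) (m n : Int), m % ((2:Int)^k) = n % 2^k → chunk m k = chunk n k := by
  intro k
  induction k with
  | zero => intro m n _; rfl
  | succ k ih =>
      intro m n h
      have d : (2:Int) ∣ 2^(k+1) := dvd_pow_self 2 (Nat.succ_ne_zero k)
      have h2 : m % 2 = n % 2 := by
        calc m % 2 = m % 2^(k+1) % 2 := (Int.emod_emod_of_dvd m d).symm
          _ = n % 2^(k+1) % 2 := by rw [h]
          _ = n % 2 := Int.emod_emod_of_dvd n d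
      have hs : (m - n) % 2^(k+1) = 0 := by
        rw [Int.sub_emod, h, Int.sub_self, Int.zero_emod]
      obtain ⟨c, hc⟩ := Int.dvd_of_emod_eq_zero hs
      have hm : m = n + 2^k * c * 2 := by rw [pow_succ] at hc; linarith
      have h3 : m / 2 % 2^k = n / 2 % 2^k := by
        rw [hm, Int.add_mul_ediv_right n (2^k * c) (by norm_num), Int.add_mul_emod_self_left]
      rw [chunk, chunk, ih _ _ h3, h2]

lemma chunk_split : ∀ (b a : Nat) (n : Int), chunk n (a + b) = chunk (n / 2^b) a ++ chunk n b := by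
  intro b
  induction b with
  | zero => intro a n; simp [chunk, String.append_empty]
  | succ b ih =>
      intro a n
      rw [show a + (b+1) = (a+b) + 1 from rfl, chunk, ih, chunk]
      have hd : n / 2 / 2^b = n / 2^(b+1) := by
        rw [Int.ediv_ediv_of_nonneg (by positivity), pow_succ, mul_comm ((2:Int)^b) 2]
      rw [hd, String.append_assoc]

lemma table_chunk (v : Int) (h0 : 0 ≤ v) (h1 : v < 16) :
    PySem.List.pyGetD nibbleTable v "" = chunk v 4 := by
  interval_cases v <;> decide

lemma floordiv_pos' (a b : Int) (h : 0 < b) : PySem.Int.floordiv a b = a / b :=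
  PySem.Int.floordiv_eq_ediv_of_pos h

lemma mod_pos' (a b : Int) (h : 0 < b) : PySem.Int.mod a b = a % b :=
  PySem.Int.mod_eq_emod_of_pos h

lemma row_eq (n : Int) : numberToText n 16 = nibbleRow (PySem.Int.mod n 65536) := by
  rw [numberToText_eq_chunk]
  rw [mod_pos' n 65536 (by norm_num)]
  set m := n % 65536 with hm
  have h0 : 0 ≤ m := Int.emod_nonneg n (by norm_num)
  have h1 : m < 65536 := Int.emod_lt_of_pos n (by norm_num)
  have hc : chunk n 16 = chunk m 16 := by
    apply chunk_congr
    rw [show ((2:Int)^16) = 65536 by norm_num, hm, Int.emod_emod_of_dvd n dvd_rfl]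
  have e1 : chunk m 16 = chunk (m / 2^12) 4 ++ chunk m 12 := chunk_split 12 4 m
  have e2 : chunk m 12 = chunk (m / 2^8) 4 ++ chunk m 8 := chunk_split 8 4 m
  have e3 : chunk m 8 = chunk (m / 2^4) 4 ++ chunk m 4 := chunk_split 4 4 m
  have p1 : chunk (m / 2^12) 4 = PySem.List.pyGetD nibbleTable (PySem.Int.floordiv m 4096) "" := by
    rw [floordiv_pos' m 4096 (by norm_num), show ((2:Int)^12) = 4096 by norm_num]
    exact (table_chunk _ (by omega) (by omega)).symm
  have p2 : chunk (m / 2^8) 4 = PySem.List.pyGetD nibbleTable (PySem.Int.mod (PySem.Int.floordiv m 256) 16) "" := by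
    rw [floordiv_pos' m 256 (by norm_num), mod_pos' _ 16 (by norm_num),
        show ((2:Int)^8) = 256 by norm_num]
    rw [table_chunk _ (by omega) (by omega)]
    apply chunk_congr
    rw [show ((2:Int)^4) = 16 by norm_num, Int.emod_emod_of_dvd _ dvd_rfl]
  have p3 : chunk (m / 2^4) 4 = PySem.List.pyGetD nibbleTable (PySem.Int.mod (PySem.Int.floordiv m 16) 16) "" := by
    rw [floordiv_pos' m 16 (by norm_num), mod_pos' _ 16 (by norm_num),
        show ((2:Int)^4) = 16 by norm_num]
    rw [table_chunk _ (by omega) (by omega)]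
    apply chunk_congr
    rw [show ((2:Int)^4) = 16 by norm_num, Int.emod_emod_of_dvd _ dvd_rfl]
  have p4 : chunk m 4 = PySem.List.pyGetD nibbleTable (PySem.Int.mod m 16) "" := by
    rw [mod_pos' _ 16 (by norm_num), table_chunk _ (by omega) (by omega)]
    apply chunk_congr
    rw [show ((2:Int)^4) = 16 by norm_num, Int.emod_emod_of_dvd _ dvd_rfl]
  rw [hc, e1, e2, e3, p1, p2, p3, p4, nibbleRow]
  simp only [String.append_assoc]

lemma strJoin_empty_cons (x : String) (xs : List String) :
    PySem.Str.join "" (x :: xs) = x ++ PySem.Str.join "" xs := by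
  cases xs with
  | nil => simp [PySem.Str.join, PySem.Chars.join_singleton, PySem.Chars.join_nil]
  | cons y ys => simp [PySem.Str.join, PySem.Chars.join_cons_cons]

lemma strJoin_empty_nil : PySem.Str.join "" ([] : List String) = "" := by decide

lemma lineLoop_eq (l : List Int) (t : String) :
    numbersToBitmapTextLoop l t
      = t ++ PySem.Str.join "" (l.map (fun n => nibbleRow (PySem.Int.mod n 65536))) := by
  induction l generalizing t with
  | nil => simp [numbersToBitmapTextLoop, strJoin_empty_nil, String.append_empty]
  | cons n l ih =>
      rw [numbersToBitmapTextLoop, ih, List.map_cons, strJoin_empty_cons, row_eq,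
        String.append_assoc]

-- ===== VERDICT (by name: the statement is the Claim_ definition above) =====
theorem numbersToBitmapText_spec : Claim_equal_numbersToBitmapText := by
  intro numberArray _
  show numbersToBitmapText numberArray = numbersToBitmapText_alt numberArray
  rw [numbersToBitmapText, PySem.List.foldl_append_singleton_eq_map, List.nil_append,
    numbersToBitmapText_alt]
  apply List.map_congr_left
  intro line _
  rw [lineLoop_eq, String.empty_append]
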